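-- pv_equiv track=rewrite | github.com/klenwell/code-challenges | python/advent-of-code/2015/day-11.py | includes_two_non_overlapping_pairs
-- ===== SOURCE A (Python) =====
-- def includes_two_non_overlapping_pairs(password):
--     pairs = []
--
--     for n, letter in enumerate(password):
--         if n == 0:
--             continue
--
--         prev = password[n-1]
--
--         if letter == prev:
--             # Pairs must not overlap
--             if n > 1:
--                 pre_prev = password[n-2]
--                 if pre_prev == prev:
--                     continue
--
--             pair = (prev, letter)
--
--             # Pairs must differ
--             if pair not in pairs:
--                 pairs.append(pair)
--
--     return len(pairs) > 1
-- ===== SOURCE B (Python) =====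
-- def includes_two_non_overlapping_pairs(password):
--     # Scan maximal runs of equal characters; collect letters whose run length >= 2.
--     letters = set()
--     i, n = 0, len(password)
--     while i < n:
--         j = i
--         while j < n and password[j] == password[i]:
--             j += 1
--         if j - i >= 2:
--             letters.add(password[i])
--         i = j
--     return len(letters) > 1
-- ===== Notes on version B (the rewrite author's own statement) =====
-- stated objective: idiomatic
-- what changed: A scans indices keeping a deduplicated list of (prev, letter) pairs with overlap checks via password[n-2]; B scans the string as maximal runs of equal characters and collects the set of letters whose run length is at least 2, returning whether that set has more than one element.
import Mathlib
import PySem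

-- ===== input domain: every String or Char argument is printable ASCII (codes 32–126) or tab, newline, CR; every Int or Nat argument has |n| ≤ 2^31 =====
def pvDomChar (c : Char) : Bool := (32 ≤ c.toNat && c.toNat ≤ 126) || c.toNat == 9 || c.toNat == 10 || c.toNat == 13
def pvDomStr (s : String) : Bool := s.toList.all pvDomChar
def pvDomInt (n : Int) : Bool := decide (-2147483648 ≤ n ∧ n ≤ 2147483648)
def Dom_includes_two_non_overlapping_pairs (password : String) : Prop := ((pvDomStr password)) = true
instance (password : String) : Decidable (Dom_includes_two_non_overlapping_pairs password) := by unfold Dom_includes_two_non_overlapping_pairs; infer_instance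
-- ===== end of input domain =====

-- B replaces A's indexed scan with a dedup pair list by a run-scan collecting a set of letters (objective: idiomatic).


-- ===== PORT A =====
-- loop body of A's 'for n, letter in enumerate(password)' (the 'none' arms are IndexError,
-- unreachable since every index A forms is in range)
def aStep (l : List Char) (pairs : List (Char × Char)) (e : Int × Char) : List (Char × Char) :=
  if e.1 = 0 then pairs
  else
    match PySem.List.pyGet? l (e.1 - 1) with
    | none => pairs
    | some prev =>
      if e.2 = prev then
        if 1 < e.1 then
          match PySem.List.pyGet? l (e.1 - 2) with
          | none => pairs
          | some pre_prev =>
            if pre_prev = prev then pairs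
            else if (prev, e.2) ∈ pairs then pairs else pairs ++ [(prev, e.2)]
        else if (prev, e.2) ∈ pairs then pairs else pairs ++ [(prev, e.2)]
      else pairs

def includes_two_non_overlapping_pairs (password : String) : Bool :=
  let pairs := (PySem.List.enumerate password.toList).foldl (aStep password.toList) []
  decide (pairs.length > 1)

-- ===== PORT B =====
-- B's outer while loop: split off one maximal run per step, keep letters of runs of length ≥ 2
def bRuns : List Char → PySem.Set Char → PySem.Set Char
  | [], letters => letters
  | c :: rest, letters =>
    let run := rest.takeWhile (· == c)
    let r := rest.dropWhile (· == c)
    bRuns r (if 2 ≤ run.length + 1 then PySem.Set.add letters c else letters)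
termination_by l => l.length
decreasing_by
  simpa using Nat.lt_succ_of_le (List.length_dropWhile_le _ _)

def includes_two_non_overlapping_pairs_alt (password : String) : Bool :=
  decide ((bRuns password.toList PySem.Set.empty).length > 1)

-- ===== PRECONDITION & SPEC =====
def Spec_includes_two_non_overlapping_pairs (password : String) (out : Bool) : Prop := out = includes_two_non_overlapping_pairs_alt password
instance (password : String) (out : Bool) : Decidable (Spec_includes_two_non_overlapping_pairs password out) := by unfold Spec_includes_two_non_overlapping_pairs; infer_instance

-- ===== CLAIM (what is proved, stated in full; the proofs are below) =====
def Claim_equal_includes_two_non_overlapping_pairs : Prop := ∀ (password : String), Dom_includes_two_non_overlapping_pairs password → Spec_includes_two_non_overlapping_pairs password (includes_two_non_overlapping_pairs password)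

-- ===== LEMMAS AND PROOFS =====

-- middle form of A's loop: explicit previous / pre-previous characters instead of indices
def Mrec : Option Char → Char → List Char → List (Char × Char) → List (Char × Char)
  | _, _, [], s => s
  | pp, p, c :: cs, s =>
      Mrec (some p) c cs
        (if c = p ∧ pp ≠ some p then (if (p, c) ∈ s then s else s ++ [(p, c)]) else s)

-- middle form of B: elementwise recursion on a set of letters
def Erec : Option Char → Char → List Char → PySem.Set Char → PySem.Set Char
  | _, _, [], s => s
  | pp, p, c :: cs, s =>
      Erec (some p) c cs (if c = p ∧ pp ≠ some p then PySem.Set.add s p else s)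

theorem aFold_eq_M (l : List Char) : ∀ (xs : List Char) (k : Nat)
    (s : List (Char × Char)) (p pp : Char), l.drop k = xs → 2 ≤ k →
    l[k-1]? = some p → l[k-2]? = some pp →
    (PySem.List.enumerate xs (k : Int)).foldl (aStep l) s = Mrec (some pp) p xs s := by
  intro xs
  induction xs with
  | nil => intro k s p pp _ _ _ _; rw [PySem.List.enumerate_nil]; rfl
  | cons c cs ih =>
    intro k s p pp hdrop hk hp hpp
    rw [PySem.List.enumerate_cons, List.foldl_cons]
    have hc : l[k]? = some c := by
      have h0 : (l.drop k)[0]? = l[k+0]? := by simp [List.getElem?_drop]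
      rw [hdrop] at h0; simpa using h0.symm
    have hstep : aStep l s ((k : Int), c) =
        (if c = p ∧ some pp ≠ some p then (if (p, c) ∈ s then s else s ++ [(p, c)]) else s) := by
      unfold aStep
      have e1 : (k : Int) - 1 = ((k - 1 : Nat) : Int) := by omega
      have e2 : (k : Int) - 2 = ((k - 2 : Nat) : Int) := by omega
      simp only [e1, e2, PySem.List.pyGet?_natCast, hp, hpp]
      have hk0 : ¬ ((k : Int) = 0) := by omega
      have hk1 : (1 : Int) < (k : Int) := by omega
      simp only [hk0, if_false, hk1, if_true]
      by_cases hcp : c = p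
      · subst hcp
        by_cases hppc : pp = c
        · simp [hppc]
        · simp [hppc]
      · simp [hcp]
    rw [hstep]
    have hdrop' : l.drop (k + 1) = cs := by
      have ht : (l.drop k).tail = l.drop (k + 1) := List.tail_drop
      rw [hdrop] at ht
      simpa using ht.symm
    have hrt := ih (k + 1) (if c = p ∧ some pp ≠ some p then (if (p, c) ∈ s then s else s ++ [(p, c)]) else s) c p hdrop' (by omega)
      (by simpa using hc) (by simpa using hp)
    rw [show ((k : Int) + 1) = ((k + 1 : Nat) : Int) by push_cast; ring]
    rw [hrt]
    rfl

theorem A_eq_M (l : List Char) :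
    (PySem.List.enumerate l).foldl (aStep l) [] =
      (match l with | [] => [] | a :: rest => Mrec none a rest []) := by
  match l with
  | [] => rw [PySem.List.enumerate_nil]; rfl
  | [a] => rw [PySem.List.enumerate_cons, PySem.List.enumerate_nil]; rfl
  | a :: b :: rest =>
    rw [PySem.List.enumerate_cons, PySem.List.enumerate_cons]
    simp only [List.foldl_cons]
    have h0 : aStep (a :: b :: rest) [] ((0 : Int), a) = [] := by
      unfold aStep; simp
    rw [h0]
    have h1 : aStep (a :: b :: rest) [] ((0 : Int) + 1, b) =
        (if b = a then [(a, b)] else []) := by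
      unfold aStep
      norm_num [PySem.List.pyGet?_zero_cons]
    rw [h1]
    have h2 := aFold_eq_M (a :: b :: rest) rest 2
      (if b = a then [(a, b)] else []) b a (by rfl) (by omega) (by rfl) (by rfl)
    rw [show ((0 : Int) + 1 + 1) = ((2 : Nat) : Int) by norm_num]
    rw [h2]
    have hM : Mrec none a (b :: rest) [] =
        Mrec (some a) b rest
          (if b = a ∧ (none : Option Char) ≠ some a then
            (if (a, b) ∈ ([] : List (Char × Char)) then [] else [] ++ [(a, b)]) else []) := rfl
    rw [hM]
    by_cases hba : b = a
    · simp [hba]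
    · simp [hba]

theorem M_map_fst : ∀ (xs : List Char) (pp : Option Char) (p : Char)
    (s : List (Char × Char)), (∀ q ∈ s, q.1 = q.2) →
    (Mrec pp p xs s).map Prod.fst = Erec pp p xs (s.map Prod.fst) := by
  intro xs
  induction xs with
  | nil => intro pp p s _; rfl
  | cons c cs ih =>
    intro pp p s h
    show (Mrec (some p) c cs _).map Prod.fst = Erec (some p) c cs _
    by_cases g : c = p ∧ pp ≠ some p
    · rw [if_pos g, if_pos g]
      obtain ⟨hc, -⟩ := g; subst hc
      have hmem : ((c, c) ∈ s) ↔ c ∈ s.map Prod.fst := by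
        constructor
        · intro hq; exact List.mem_map_of_mem hq
        · intro hq
          rcases List.mem_map.1 hq with ⟨q, hqs, hq1⟩
          have hd := h q hqs
          have : q = (c, c) := by
            rcases q with ⟨x, y⟩; simp_all
          rw [← this]; exact hqs
      by_cases hin : (c, c) ∈ s
      · rw [if_pos hin]
        have hadd : PySem.Set.add (s.map Prod.fst) c = s.map Prod.fst := by
          simp [PySem.Set.add, PySem.Set.contains, hmem.1 hin]
        rw [hadd]
        exact ih _ _ _ h
      · rw [if_neg hin]
        have hnotin : c ∉ s.map Prod.fst := fun hx => hin (hmem.2 hx)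
        have hadd : PySem.Set.add (s.map Prod.fst) c = s.map Prod.fst ++ [c] := by
          simp only [PySem.Set.add, PySem.Set.contains]
          rw [if_neg (by simpa using hnotin)]
        rw [hadd]
        have h' : ∀ q ∈ s ++ [(c, c)], q.1 = q.2 := by
          intro q hq
          rcases List.mem_append.1 hq with hq | hq
          · exact h q hq
          · simp at hq; simp [hq]
        have := ih (some c) c (s ++ [(c, c)]) h'
        simpa using this
    · rw [if_neg g, if_neg g]
      exact ih _ _ _ h

theorem E_skip (p : Char) : ∀ (cs : List Char) (s : PySem.Set Char),
    Erec (some p) p cs s =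
      (match cs.dropWhile (· == p) with
       | [] => s
       | d :: cs' => Erec (some p) d cs' s) := by
  intro cs
  induction cs with
  | nil => intro s; rfl
  | cons c cs ih =>
    intro s
    by_cases hc : c = p
    · subst hc
      show Erec (some c) c cs _ = _
      rw [if_neg (by simp)]
      rw [List.dropWhile_cons]
      simp only [beq_self_eq_true, if_true]
      exact ih s
    · show Erec (some p) c cs _ = _
      rw [if_neg (by simp [hc])]
      rw [List.dropWhile_cons]
      simp only [beq_iff_eq, hc, if_false]

theorem E_eq_bRuns : ∀ (n : Nat) (xs : List Char) (p : Char) (pp : Option Char)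
    (s : PySem.Set Char), xs.length ≤ n → pp ≠ some p →
    Erec pp p xs s = bRuns (p :: xs) s := by
  intro n
  induction n with
  | zero =>
    intro xs p pp s hn _
    have : xs = [] := List.length_eq_zero_iff.1 (Nat.le_zero.1 hn)
    subst this
    simp [bRuns, Erec]
  | succ n ih =>
    intro xs p pp s hn hpp
    match xs with
    | [] => simp [bRuns, Erec]
    | c :: cs =>
      rw [bRuns]
      by_cases hc : c = p
      · subst hc
        have htw : (c :: cs).takeWhile (· == c) = c :: cs.takeWhile (· == c) := by
          rw [List.takeWhile_cons]; simp
        have hdw : (c :: cs).dropWhile (· == c) = cs.dropWhile (· == c) := by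
          rw [List.dropWhile_cons]; simp
        rw [htw, hdw]
        rw [if_pos (by simp)]
        show Erec (some c) c cs (if c = c ∧ pp ≠ some c then PySem.Set.add s c else s) = _
        rw [if_pos ⟨rfl, hpp⟩]
        rw [E_skip]
        cases hr : cs.dropWhile (· == c) with
        | nil => simp [bRuns]
        | cons d cs' =>
          have hd : d ≠ c := by
            have := List.head?_dropWhile_not (· == c) cs
            rw [hr] at this
            simp at this
            exact this
          have hlen : cs'.length ≤ n := by
            have h1 : (cs.dropWhile (· == c)).length ≤ cs.length := List.length_dropWhile_le _ _
            rw [hr] at h1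
            simp at h1 hn
            omega
          show Erec (some c) d cs' (PySem.Set.add s c) = bRuns (d :: cs') (PySem.Set.add s c)
          exact ih cs' d (some c) _ hlen (by simp [Ne.symm hd])
      · have htw : (c :: cs).takeWhile (· == p) = [] := by
          rw [List.takeWhile_cons]; simp [hc]
        have hdw : (c :: cs).dropWhile (· == p) = c :: cs := by
          rw [List.dropWhile_cons]; simp [hc]
        rw [htw, hdw]
        rw [if_neg (by simp)]
        show Erec (some p) c cs (if c = p ∧ pp ≠ some p then PySem.Set.add s p else s) = _
        rw [if_neg (by simp [hc])]
        have hlen : cs.length ≤ n := by simp at hn; omega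
        exact ih cs c (some p) s hlen (by simp [Ne.symm hc])

-- ===== VERDICT (by name: the statement is the Claim_ definition above) =====
theorem includes_two_non_overlapping_pairs_spec : Claim_equal_includes_two_non_overlapping_pairs := by
  intro password _
  unfold Spec_includes_two_non_overlapping_pairs
  unfold includes_two_non_overlapping_pairs includes_two_non_overlapping_pairs_alt
  simp only
  rw [A_eq_M]
  cases h : password.toList with
  | nil => simp [bRuns]
  | cons a rest =>
    have hm : (Mrec none a rest []).length = (Erec none a rest []).length := by
      have h2 := M_map_fst rest none a [] (by simp)
      simpa using congrArg List.length h2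
    have he := E_eq_bRuns rest.length rest a none [] le_rfl (by simp)
    rw [he] at hm
    simp only [PySem.Set.empty, hm]
    rfl
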